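-- pv_equiv track=rewrite | github.com/hmartiro/selfgraph | selfgraph/core/prepare.py | create_word_people_freq
-- ===== SOURCE A (Python) =====
-- def create_word_people_freq(words, freq, people, distinct_people):
--
--     word_dict = {}
--     for distinct_word in set(words):
--         row_list = [0]*len(distinct_people)
--         for i in range(len(words)):
--             if distinct_word == words[i] and people[i] in distinct_people:
--                 row_list[distinct_people.index(people[i])] = freq[i]
--         word_dict[distinct_word] = row_list
--
--     return word_dict
-- ===== SOURCE B (Python) =====
-- def create_word_people_freq(words, freq, people, distinct_people):
--     # One pass over zip(words, people) with a dict of rows and a precomputed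
--     # person -> column index; freq is indexed only when a column is hit.
--     col = {}
--     for j, p in enumerate(distinct_people):
--         col.setdefault(p, j)
--     n = len(distinct_people)
--     word_dict = {}
--     for i, (w, p) in enumerate(zip(words, people)):
--         row = word_dict.get(w)
--         if row is None:
--             row = [0] * n
--             word_dict[w] = row
--         j = col.get(p)
--         if j is not None:
--             row[j] = freq[i]
--     return word_dict
-- ===== Notes on version B (the rewrite author's own statement) =====
-- stated objective: alternative
-- what changed: A rescans the whole words/people/freq lists once per distinct word and calls distinct_people.index inside the loop; B makes a single pass over enumerate(zip(words, people)) maintaining a dict of rows, with a person-to-column dict precomputed once, so the per-word rescans and the inner .index scans disappear.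
import Mathlib
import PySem

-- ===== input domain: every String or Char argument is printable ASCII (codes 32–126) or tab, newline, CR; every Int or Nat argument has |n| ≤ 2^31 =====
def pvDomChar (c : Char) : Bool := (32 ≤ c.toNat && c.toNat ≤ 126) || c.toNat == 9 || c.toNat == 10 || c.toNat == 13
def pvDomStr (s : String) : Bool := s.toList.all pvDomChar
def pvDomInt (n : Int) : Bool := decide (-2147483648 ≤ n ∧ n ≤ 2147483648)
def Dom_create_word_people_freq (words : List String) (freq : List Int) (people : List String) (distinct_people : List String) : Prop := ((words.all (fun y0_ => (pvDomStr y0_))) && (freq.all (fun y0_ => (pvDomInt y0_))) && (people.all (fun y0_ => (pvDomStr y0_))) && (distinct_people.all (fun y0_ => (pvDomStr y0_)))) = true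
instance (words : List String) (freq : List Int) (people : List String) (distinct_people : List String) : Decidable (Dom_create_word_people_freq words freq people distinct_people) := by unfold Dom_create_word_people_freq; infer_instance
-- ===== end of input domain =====

-- B replaces A's nested rescan per distinct word by one pass over the zipped
-- (word, person, freq) triples with a dict of rows and a precomputed
-- person -> column-index dict.

-- ===== PORT A =====
def create_word_people_freq (words : List String) (freq : List Int) (people : List String) (distinct_people : List String) : List (String × List Int) :=
  ((PySem.Set.ofList words).foldl
    (fun (word_dict : PySem.Dict String (List Int)) distinct_word =>
      let row_list :=
        (PySem.List.pyRange 0 words.length 1).foldl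
          (fun row_list i =>
            if distinct_word == PySem.List.pyGetD words i "" &&
               distinct_people.contains (PySem.List.pyGetD people i "") then
              PySem.List.pySetD row_list
                (((PySem.List.index? distinct_people (PySem.List.pyGetD people i "")).getD 0 : Nat) : Int)
                (PySem.List.pyGetD freq i 0)
            else row_list)
          (List.replicate distinct_people.length 0)
      word_dict.insert distinct_word row_list)
    PySem.Dict.empty).items

-- ===== PORT B =====
def create_word_people_freq_alt (words : List String) (freq : List Int) (people : List String) (distinct_people : List String) : List (String × List Int) :=
  let col : PySem.Dict String Int :=
    (PySem.List.enumerate distinct_people 0).foldl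
      (fun col jp => col.setdefault jp.2 jp.1) PySem.Dict.empty
  let n := distinct_people.length
  ((PySem.List.enumerate (words.zip people) 0).foldl
    (fun (word_dict : PySem.Dict String (List Int)) it =>
      let row := match word_dict.get? it.2.1 with
        | some r => r
        | none => List.replicate n 0
      let row' := match col.get? it.2.2 with
        | some j => PySem.List.pySetD row j (PySem.List.pyGetD freq it.1 0)
        | none => row
      word_dict.insert it.2.1 row')
    PySem.Dict.empty).items

-- ===== PRECONDITION & SPEC =====
-- Pre_ excludes EXACTLY the inputs on which Python A raises IndexError:
-- people shorter than a nonempty words (A indexes people[i] for every i in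
-- range(len(words))), or some position i whose person is in distinct_people
-- but i >= len(freq) (then A indexes freq[i]).  On every input where A
-- returns a value, Pre_ holds.
def Pre_create_word_people_freq (words : List String) (freq : List Int) (people : List String) (distinct_people : List String) : Prop :=
  words.length ≤ people.length ∧
  ∀ i < words.length, distinct_people.contains (people.getD i "") = true → i < freq.length
instance (words : List String) (freq : List Int) (people : List String) (distinct_people : List String) : Decidable (Pre_create_word_people_freq words freq people distinct_people) := by unfold Pre_create_word_people_freq; infer_instance

def pvWitness_create_word_people_freq : List String × List Int × List String × List String :=
  (["a", "b", "a"], [1, 2, 3], ["p", "q", "p"], ["p", "q"])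

def Spec_create_word_people_freq (words : List String) (freq : List Int) (people : List String) (distinct_people : List String) (out : List (String × List Int)) : Prop := out = create_word_people_freq_alt words freq people distinct_people
instance (words : List String) (freq : List Int) (people : List String) (distinct_people : List String) (out : List (String × List Int)) : Decidable (Spec_create_word_people_freq words freq people distinct_people out) := by unfold Spec_create_word_people_freq; infer_instance

-- ===== CLAIM (what is proved, stated in full; the proofs are below) =====
def Claim_equal_create_word_people_freq : Prop := ∀ (words : List String) (freq : List Int) (people : List String) (distinct_people : List String), Dom_create_word_people_freq words freq people distinct_people → Pre_create_word_people_freq words freq people distinct_people → Spec_create_word_people_freq words freq people distinct_people (create_word_people_freq words freq people distinct_people)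

-- ===== LEMMAS AND PROOFS =====

-- the common per-triple row update: set column (first index of p in dp) to f, if p occurs in dp
def pvUpd (dp : List String) (row : List Int) (p : String) (f : Int) : List Int :=
  match PySem.List.index? dp p with
  | some k => PySem.List.pySetD row (k : Int) f
  | none => row

def pvRowFrom (dp : List String) (r : List Int) (ts : List (String × String × Int)) : List Int :=
  ts.foldl (fun row t => pvUpd dp row t.2.1 t.2.2) r

lemma pvCol_get (dp : List String) : ∀ (p : String),
  ((PySem.List.enumerate dp 0).foldl (fun (c : PySem.Dict String Int) jp => c.setdefault jp.2 jp.1) PySem.Dict.empty).get? p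
  = (PySem.List.index? dp p).map (fun k => (k : Int)) := by
  induction dp using List.reverseRecOn with
  | nil =>
    intro p
    have h : PySem.List.index? ([] : List String) p = none := by
      rw [PySem.List.index?_eq_none_iff]; simp
    rw [h]; rfl
  | append_singleton l x ih =>
    intro p
    rw [PySem.List.enumerate_append, List.foldl_append]
    have hsing : PySem.List.enumerate [x] (0 + (l.length : Int)) = [((0 + (l.length : Int)), x)] := by
      rfl
    rw [hsing]
    simp only [List.foldl_cons, List.foldl_nil]
    by_cases hx : x ∈ l
    · obtain ⟨k, hk⟩ : ∃ k, PySem.List.index? l x = some k :=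
        Option.isSome_iff_exists.mp ((PySem.List.index?_isSome_iff l x).mpr hx)
      have hc : ((PySem.List.enumerate l 0).foldl (fun (c : PySem.Dict String Int) jp => c.setdefault jp.2 jp.1) PySem.Dict.empty).contains x = true := by
        rw [PySem.Dict.contains_eq_isSome_get?, ih x, hk]; rfl
      rw [PySem.Dict.setdefault_of_contains _ _ hc, ih p]
      by_cases hp : p ∈ l
      · rw [PySem.List.index?_append_of_mem _ hp]
      · have hpx : p ≠ x := fun h => hp (h ▸ hx)
        have h1 : PySem.List.index? l p = none := by
          rw [PySem.List.index?_eq_none_iff]; exact hp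
        have h2 : PySem.List.index? (l ++ [x]) p = none := by
          rw [PySem.List.index?_eq_none_iff]; simp [hp, hpx]
        rw [h1, h2]
    · have hn : PySem.List.index? l x = none := by
        rw [PySem.List.index?_eq_none_iff]; exact hx
      have hc : ((PySem.List.enumerate l 0).foldl (fun (c : PySem.Dict String Int) jp => c.setdefault jp.2 jp.1) PySem.Dict.empty).contains x = false := by
        rw [PySem.Dict.contains_eq_isSome_get?, ih x, hn]; rfl
      rw [PySem.Dict.setdefault_of_not_contains _ _ hc, PySem.Dict.get?_insert]
      by_cases hpx : p = x
      · subst hpx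
        rw [PySem.List.index?_append_singleton_self l p hx]
        simp
      · rw [if_neg hpx, ih p]
        by_cases hp : p ∈ l
        · rw [PySem.List.index?_append_of_mem _ hp]
        · have h1 : PySem.List.index? l p = none := by
            rw [PySem.List.index?_eq_none_iff]; exact hp
          have h2 : PySem.List.index? (l ++ [x]) p = none := by
            rw [PySem.List.index?_eq_none_iff]; simp [hp, hpx]
          rw [h1, h2]

lemma pvFoldl_range3 {β : Type} (F : β → String → String → Int → β) :
  ∀ (ws ps : List String) (fs : List Int) (init : β), ws.length ≤ ps.length → ws.length ≤ fs.length →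
  (List.range ws.length).foldl (fun b k => F b (ws.getD k "") (ps.getD k "") (fs.getD k 0)) init
  = (ws.zip (ps.zip fs)).foldl (fun b t => F b t.1 t.2.1 t.2.2) init := by
  intro ws
  induction ws with
  | nil => intro ps fs init _ _; simp
  | cons w ws ih =>
    intro ps fs init h1 h2
    match ps, fs with
    | [], _ => simp at h1
    | _, [] => simp at h2
    | p :: ps, f :: fs =>
      rw [List.length_cons, List.range_succ_eq_map, List.foldl_cons, List.foldl_map]
      simp only [List.getD_cons_zero, List.getD_cons_succ, List.zip_cons_cons, List.foldl_cons]
      exact ih ps fs (F init w p f) (by simpa using h1) (by simpa using h2)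

lemma pvFoldl_guard {β : Type} (dw : String) (g : β → (String × String × Int) → β) :
  ∀ (ts : List (String × String × Int)) (init : β),
  ts.foldl (fun b t => if dw == t.1 then g b t else b) init
  = (ts.filter (fun t => dw == t.1)).foldl g init := by
  intro ts
  induction ts with
  | nil => intro init; rfl
  | cons t ts ih =>
    intro init
    rw [List.foldl_cons, List.filter_cons]
    by_cases h : dw == t.1
    · rw [if_pos h, if_pos h, List.foldl_cons, ih]
    · rw [if_neg h, if_neg h, ih]

lemma pvStep_eq (dp : List String) (dw : String) (b : List Int) (w p : String) (f : Int) :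
  (if dw == w && dp.contains p then
     PySem.List.pySetD b (((PySem.List.index? dp p).getD 0 : Nat) : Int) f
   else b)
  = if dw == w then pvUpd dp b p f else b := by
  cases hk : PySem.List.index? dp p with
  | none =>
    have hnp : p ∉ dp := (PySem.List.index?_eq_none_iff dp p).mp hk
    simp only [pvUpd, hk]
    simp [hnp]
  | some k =>
    have hp : p ∈ dp := (PySem.List.index?_isSome_iff dp p).mp (by rw [hk]; rfl)
    simp only [pvUpd, hk]
    simp [hp]

lemma pvA_row (words : List String) (freq : List Int) (people dp : List String) (dw : String)
    (h1 : words.length ≤ people.length) (h2 : words.length ≤ freq.length) :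
  (PySem.List.pyRange 0 words.length 1).foldl
    (fun row i =>
      if dw == PySem.List.pyGetD words i "" &&
         dp.contains (PySem.List.pyGetD people i "") then
        PySem.List.pySetD row
          (((PySem.List.index? dp (PySem.List.pyGetD people i "")).getD 0 : Nat) : Int)
          (PySem.List.pyGetD freq i 0)
      else row)
    (List.replicate dp.length 0)
  = pvRowFrom dp (List.replicate dp.length 0)
      ((words.zip (people.zip freq)).filter (fun t => dw == t.1)) := by
  rw [PySem.List.pyRange_zero_nat, List.foldl_map]
  simp only [PySem.List.pyGetD_natCast]
  rw [pvFoldl_range3 (fun b w p f =>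
        if dw == w && dp.contains p then
          PySem.List.pySetD b (((PySem.List.index? dp p).getD 0 : Nat) : Int) f
        else b) words people freq _ h1 h2]
  have hbody : (fun (b : List Int) (t : String × String × Int) =>
      if dw == t.1 && dp.contains t.2.1 then
        PySem.List.pySetD b (((PySem.List.index? dp t.2.1).getD 0 : Nat) : Int) t.2.2
      else b)
    = fun b t => if dw == t.1 then pvUpd dp b t.2.1 t.2.2 else b := by
    funext b t
    exact pvStep_eq dp dw b t.1 t.2.1 t.2.2
  rw [hbody, pvFoldl_guard]
  rfl

lemma pvA_char (words : List String) (freq : List Int) (people dp : List String)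
    (h1 : words.length ≤ people.length) (h2 : words.length ≤ freq.length) :
  create_word_people_freq words freq people dp
  = (PySem.Set.ofList words).map (fun dw =>
      (dw, pvRowFrom dp (List.replicate dp.length 0)
            ((words.zip (people.zip freq)).filter (fun t => dw == t.1)))) := by
  unfold create_word_people_freq
  rw [PySem.Dict.items_foldl_insert_fresh (PySem.Set.ofList words) (fun a => a) _ _
        (fun a _ => PySem.Dict.contains_empty a)
        (by simpa using PySem.Set.nodup_ofList words)]
  have : (PySem.Dict.empty : PySem.Dict String (List Int)).items = [] := rfl
  rw [this, List.nil_append]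
  apply List.map_congr_left
  intro dw _
  rw [pvA_row words freq people dp dw h1 h2]

lemma pvOfList_cons (x : String) (xs : List String) :
  PySem.Set.ofList (x :: xs) = x :: (PySem.Set.ofList xs).filter (fun y => !(y == x)) := by
  have h : x :: xs = [x] ++ xs := rfl
  rw [h, PySem.Set.ofList_append, PySem.Set.update_eq_append_filter]
  have h2 : PySem.Set.ofList [x] = [x] := rfl
  rw [h2, List.singleton_append, List.cons.injEq]
  refine ⟨rfl, List.filter_congr ?_⟩
  intro y _
  by_cases hyx : y = x <;> simp [PySem.Set.contains, List.contains_eq_mem, hyx]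

lemma pvB_char (dp : List String) :
  ∀ (ts : List (String × String × Int)) (d : PySem.Dict String (List Int)), d.keys.Nodup →
  (ts.foldl (fun wd t => wd.insert t.1 (pvUpd dp ((wd.get? t.1).getD (List.replicate dp.length 0)) t.2.1 t.2.2)) d).items
  = d.items.map (fun kv => (kv.1, pvRowFrom dp kv.2 (ts.filter (fun t => kv.1 == t.1))))
    ++ ((PySem.Set.ofList (ts.map (fun t => t.1))).filter (fun y => !d.contains y)).map
        (fun dw => (dw, pvRowFrom dp (List.replicate dp.length 0) (ts.filter (fun t => dw == t.1)))) := by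
  intro ts
  induction ts with
  | nil =>
    intro d _
    simp [pvRowFrom]
  | cons t rest ih =>
    intro d hnd
    rw [List.foldl_cons]
    simp only [List.map_cons]
    rw [ih (d.insert t.1 (pvUpd dp ((d.get? t.1).getD (List.replicate dp.length 0)) t.2.1 t.2.2))
          (PySem.Dict.nodup_keys_insert d t.1 _ hnd)]
    by_cases hw : d.contains t.1 = true
    · rw [PySem.Dict.items_insert_of_contains d _ hw, List.map_map]
      congr 1
      · apply List.map_congr_left
        intro kv hkv
        rcases kv with ⟨k, v⟩
        have hv : d.get? k = some v := PySem.Dict.get?_of_mem_items d hkv hnd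
        by_cases hk : (k == t.1) = true
        · have hk' : k = t.1 := by simpa using hk
          subst hk'
          rw [List.filter_cons]
          simp only [Function.comp_apply, hk, if_pos, if_true, hv]
          rfl
        · rw [List.filter_cons]
          simp only [Function.comp_apply, hk, Bool.false_eq_true, if_false]
      · rw [pvOfList_cons, List.filter_cons]
        have hwf : (!d.contains t.1) = false := by rw [hw]; rfl
        rw [hwf]
        simp only [Bool.false_eq_true, if_false, List.filter_filter]
        have hfeq : ((PySem.Set.ofList (rest.map (fun t => t.1))).filter
            (fun y => !(d.insert t.1 (pvUpd dp ((d.get? t.1).getD (List.replicate dp.length 0)) t.2.1 t.2.2)).contains y))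
          = (PySem.Set.ofList (rest.map (fun t => t.1))).filter (fun y => !d.contains y && !(y == t.1)) := by
          apply List.filter_congr
          intro y _
          rw [PySem.Dict.contains_insert, Bool.not_or, Bool.and_comm]
        rw [hfeq]
        apply List.map_congr_left
        intro dw hdw
        have hne : (dw == t.1) = false := by
          have hb := (List.mem_filter.mp hdw).2
          rw [Bool.and_eq_true] at hb
          simpa using hb.2
        rw [List.filter_cons, hne]
        simp
    · have hw' : d.contains t.1 = false := by
        cases h : d.contains t.1
        · rfl
        · exact absurd h hw
      have hg : d.get? t.1 = none := by
        have hh := PySem.Dict.contains_eq_isSome_get? d t.1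
        rw [hw'] at hh
        cases h : d.get? t.1
        · rfl
        · rw [h] at hh; simp at hh
      rw [PySem.Dict.items_insert_of_not_contains d _ hw', List.map_append]
      rw [pvOfList_cons, List.filter_cons]
      have hwt : (!d.contains t.1) = true := by rw [hw']; rfl
      rw [hwt]
      simp only [if_true, List.map_cons, List.map_nil, List.filter_filter]
      rw [List.append_assoc, List.singleton_append]
      congr 1
      · apply List.map_congr_left
        intro kv hkv
        rcases kv with ⟨k, v⟩
        have hkmem : k ∈ d.keys := PySem.Dict.mem_keys_of_mem_items d hkv
        have hk : (k == t.1) = false := by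
          cases h : k == t.1
          · rfl
          · have he : k = t.1 := by simpa using h
            subst he
            exact absurd ((PySem.Dict.contains_iff_mem_keys d _).mpr hkmem) (by rw [hw']; simp)
        rw [List.filter_cons, hk]
        simp
      · congr 1
        · rw [List.filter_cons]
          simp only [beq_self_eq_true, if_true, hg]
          rfl
        · have hfeq : ((PySem.Set.ofList (rest.map (fun t => t.1))).filter
              (fun y => !(d.insert t.1 (pvUpd dp ((d.get? t.1).getD (List.replicate dp.length 0)) t.2.1 t.2.2)).contains y))
            = (PySem.Set.ofList (rest.map (fun t => t.1))).filter (fun y => !d.contains y && !(y == t.1)) := by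
            apply List.filter_congr
            intro y _
            rw [PySem.Dict.contains_insert, Bool.not_or, Bool.and_comm]
          rw [hfeq]
          apply List.map_congr_left
          intro dw hdw
          have hne : (dw == t.1) = false := by
            have hb := (List.mem_filter.mp hdw).2
            rw [Bool.and_eq_true] at hb
            simpa using hb.2
          rw [List.filter_cons, hne]
          simp

lemma pvFoldl_enum_zip {β : Type} (G : β → String → String → Int → β) :
  ∀ (ws ps : List String) (fs pre : List Int) (init : β), ws.length ≤ ps.length → ws.length ≤ fs.length →
  (PySem.List.enumerate (ws.zip ps) (pre.length : Int)).foldl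
      (fun b it => G b it.2.1 it.2.2 (PySem.List.pyGetD (pre ++ fs) it.1 0)) init
  = (ws.zip (ps.zip fs)).foldl (fun b t => G b t.1 t.2.1 t.2.2) init := by
  intro ws
  induction ws with
  | nil => intro ps fs pre init _ _; simp [PySem.List.enumerate]
  | cons w ws ih =>
    intro ps fs pre init h1 h2
    match ps, fs with
    | [], _ => simp at h1
    | _, [] => simp at h2
    | p :: ps, f :: fs =>
      have hcons : (w :: ws).zip (p :: ps) = [(w, p)] ++ ws.zip ps := by simp
      rw [hcons, PySem.List.enumerate_append]
      have hsing : PySem.List.enumerate [(w, p)] (pre.length : Int)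
          = [((pre.length : Int), (w, p))] := rfl
      rw [hsing, List.singleton_append, List.foldl_cons]
      have hget : PySem.List.pyGetD (pre ++ f :: fs) (pre.length : Int) 0 = f := by
        rw [PySem.List.pyGetD_natCast]
        simp [List.getD_eq_getElem?_getD, List.getElem?_append_right]
      rw [hget]
      have hlen : (pre.length : Int) + (([(w, p)] : List (String × String)).length : Int)
          = (((pre ++ [f]).length : Int)) := by simp
      rw [hlen]
      have happ : pre ++ f :: fs = (pre ++ [f]) ++ fs := by simp
      rw [happ]
      simp only [List.zip_cons_cons, List.foldl_cons]
      exact ih ps fs (pre ++ [f]) (G init w p f) (by simpa using h1) (by simpa using h2)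

lemma pvB_eq_fold (words : List String) (freq : List Int) (people dp : List String)
    (h1 : words.length ≤ people.length) (h2 : words.length ≤ freq.length) :
  create_word_people_freq_alt words freq people dp
  = ((words.zip (people.zip freq)).foldl
      (fun (wd : PySem.Dict String (List Int)) t =>
        wd.insert t.1 (pvUpd dp ((wd.get? t.1).getD (List.replicate dp.length 0)) t.2.1 t.2.2))
      PySem.Dict.empty).items := by
  simp only [create_word_people_freq_alt]
  congr 1
  have hbody : (PySem.List.enumerate (words.zip people) 0).foldl
      (fun (wd : PySem.Dict String (List Int)) it =>
        wd.insert it.2.1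
          (match (((PySem.List.enumerate dp 0).foldl
              (fun (c : PySem.Dict String Int) jp => c.setdefault jp.2 jp.1) PySem.Dict.empty)).get? it.2.2 with
          | some j =>
            PySem.List.pySetD
              (match wd.get? it.2.1 with
               | some r => r
               | none => List.replicate dp.length 0) j (PySem.List.pyGetD freq it.1 0)
          | none =>
            match wd.get? it.2.1 with
            | some r => r
            | none => List.replicate dp.length 0))
      PySem.Dict.empty
    = (PySem.List.enumerate (words.zip people) 0).foldl
      (fun (wd : PySem.Dict String (List Int)) it =>
        wd.insert it.2.1
          (pvUpd dp ((wd.get? it.2.1).getD (List.replicate dp.length 0)) it.2.2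
            (PySem.List.pyGetD freq it.1 0)))
      PySem.Dict.empty := by
    apply List.foldl_ext
    intro wd it _
    rw [pvCol_get dp it.2.2]
    unfold pvUpd
    cases hk : PySem.List.index? dp it.2.2 <;> cases hw : wd.get? it.2.1 <;> simp [hk, hw]
  rw [hbody]
  have h0 : (0 : Int) = (([] : List Int).length : Int) := rfl
  rw [h0]
  have hf : freq = ([] : List Int) ++ freq := rfl
  conv_lhs => rw [hf]
  exact pvFoldl_enum_zip
    (fun (wd : PySem.Dict String (List Int)) w p f =>
      wd.insert w (pvUpd dp ((wd.get? w).getD (List.replicate dp.length 0)) p f))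
    words people freq [] PySem.Dict.empty h1 h2

lemma pvContains_empty_filter (l : List String) :
  l.filter (fun y => !(PySem.Dict.empty : PySem.Dict String (List Int)).contains y) = l := by
  apply List.filter_eq_self.mpr
  intro y _
  rw [PySem.Dict.contains_empty]
  rfl

-- padding freq with zeros does not change either port: both read freq only
-- through pyGetD with a nonnegative index and default 0
lemma pvGetD_pad (freq : List Int) (pad k : Nat) :
  PySem.List.pyGetD (freq ++ List.replicate pad 0) (k : Int) 0 = PySem.List.pyGetD freq (k : Int) 0 := by
  rw [PySem.List.pyGetD_natCast, PySem.List.pyGetD_natCast]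
  by_cases h : k < freq.length
  · simp [List.getD_eq_getElem?_getD, List.getElem?_append_left h]
  · simp only [List.getD_eq_getElem?_getD]
    rw [List.getElem?_eq_none (by omega : freq.length ≤ k)]
    by_cases h2 : k < freq.length + pad
    · rw [List.getElem?_append_right (by omega : freq.length ≤ k)]
      rw [List.getElem?_replicate]
      split_ifs with h3
      · rfl
      · rfl
    · rw [List.getElem?_eq_none (by simp; omega)]

lemma pvA_pad (words : List String) (freq : List Int) (people dp : List String) (pad : Nat) :
  create_word_people_freq words (freq ++ List.replicate pad 0) people dp
  = create_word_people_freq words freq people dp := by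
  unfold create_word_people_freq
  congr 2
  funext wd dw
  exact congrArg (wd.insert dw) (by
    rw [PySem.List.pyRange_zero_nat, List.foldl_map, List.foldl_map]
    congr 1
    funext row k
    rw [pvGetD_pad])

lemma pvB_pad (words : List String) (freq : List Int) (people dp : List String) (pad : Nat) :
  create_word_people_freq_alt words (freq ++ List.replicate pad 0) people dp
  = create_word_people_freq_alt words freq people dp := by
  unfold create_word_people_freq_alt
  refine congrArg PySem.Dict.items (List.foldl_ext _ _ _ ?_)
  intro wd it hit
  obtain ⟨k, hk, rfl⟩ := (PySem.List.mem_enumerate_iff _ _ _).mp hit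
  simp only [zero_add]
  rw [pvGetD_pad]

-- ===== VERDICT (by name: the statement is the Claim_ definition above) =====
theorem create_word_people_freq_spec : Claim_equal_create_word_people_freq := by
  unfold Claim_equal_create_word_people_freq
  intro words freq people dp _ hpre
  unfold Spec_create_word_people_freq
  obtain ⟨h1, _⟩ := hpre
  rw [← pvA_pad words freq people dp (words.length - freq.length),
      ← pvB_pad words freq people dp (words.length - freq.length)]
  have h2 : words.length ≤ (freq ++ List.replicate (words.length - freq.length) 0).length := by
    simp; omega
  rw [pvA_char words _ people dp h1 h2, pvB_eq_fold words _ people dp h1 h2]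
  rw [pvB_char dp (words.zip (people.zip (freq ++ List.replicate (words.length - freq.length) 0))) PySem.Dict.empty
        (by simp [show (PySem.Dict.empty : PySem.Dict String (List Int)).items = ([] : List (String × List Int)) from rfl, PySem.Dict.keys])]
  have hfst : (words.zip (people.zip (freq ++ List.replicate (words.length - freq.length) 0))).map (fun t => t.1) = words := by
    apply List.map_fst_zip
    rw [List.length_zip]
    simp at h2 ⊢
    omega
  rw [hfst, pvContains_empty_filter]
  have hempty : (PySem.Dict.empty : PySem.Dict String (List Int)).items = [] := rfl
  rw [hempty, List.map_nil, List.nil_append]
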